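-- pv_equiv track=rewrite | github.com/schebachlab/gnrhr_epistasis_dms | average_replicates_with_rank_cutoffs_gnrhr_epistasis.py | expand_sequence
-- ===== SOURCE A (Python) =====
-- def expand_sequence(sequence, alphabet_order):
--     mut_list = list(alphabet_order)
--     expanded_position_list = []
--     labels = []
--     expanded_wt_seq = []
--     expanded_mut_seq = []
--     for idx in range(len(sequence)):
--         position = idx + 1
--         position_label = str(position)
--         wt_label = sequence[idx]
--         for mut_idx in range(len(mut_list)):
--             mut_label = mut_list[mut_idx]
--             label_list = [wt_label, position_label, mut_label]
--             variant_label = ''.join(label_list)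
--             expanded_position_list.append(position_label)
--             labels.append(variant_label)
--             expanded_wt_seq.append(wt_label)
--             expanded_mut_seq.append(mut_label)
--     return expanded_position_list, labels, expanded_wt_seq, expanded_mut_seq
-- ===== SOURCE B (Python) =====
-- def expand_sequence(sequence, alphabet_order):
--     # Flat-index construction: build each of the four columns directly by
--     # arithmetic on a single flattened index (k // m recovers the position),
--     # with the mutant column made by list repetition, instead of nested loops.
--     n, m = len(sequence), len(alphabet_order)
--     muts = list(alphabet_order) * n
--     positions = [str(k // m + 1) for k in range(n * m)]
--     wts = [sequence[k // m] for k in range(n * m)]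
--     labels = [w + p + u for w, p, u in zip(wts, positions, muts)]
--     return positions, labels, wts, muts
-- ===== Notes on version B (the rewrite author's own statement) =====
-- stated objective: alternative
-- what changed: B replaces A's nested loops with four accumulators by direct flat-index construction: each column is built on its own from the flattened index k (position = k // m), the mutant column by list repetition (alphabet * n), and labels by zipping the other three columns.
import Mathlib
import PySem

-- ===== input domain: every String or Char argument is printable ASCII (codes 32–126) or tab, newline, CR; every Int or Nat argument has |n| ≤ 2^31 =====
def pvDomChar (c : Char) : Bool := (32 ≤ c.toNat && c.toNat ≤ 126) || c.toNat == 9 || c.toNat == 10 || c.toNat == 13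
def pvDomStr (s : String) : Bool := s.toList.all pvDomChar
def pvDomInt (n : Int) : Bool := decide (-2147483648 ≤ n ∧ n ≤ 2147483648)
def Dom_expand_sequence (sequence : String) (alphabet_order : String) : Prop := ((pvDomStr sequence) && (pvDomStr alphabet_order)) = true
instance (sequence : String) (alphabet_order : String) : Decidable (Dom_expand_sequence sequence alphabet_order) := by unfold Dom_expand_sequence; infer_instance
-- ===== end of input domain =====

-- B builds each of the four columns directly by flat-index arithmetic (position = k // m) and
-- list repetition, instead of A's nested loops maintaining four parallel accumulators (objective: alternative).

-- ===== PORT A =====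
-- Literal transliteration of A: nested loops over index ranges, four parallel accumulators.
def expand_sequence (sequence : String) (alphabet_order : String) :
    List String × List String × List String × List String :=
  let mut_list : List String := alphabet_order.toList.map (fun c => String.ofList [c])  -- list(alphabet_order)
  (List.range sequence.toList.length).foldl
    (fun st (idx : Nat) =>
      let position_label := PySem.Int.toStr ((idx : Int) + 1)  -- str(position)
      let wt_label := String.ofList [sequence.toList.getD idx ' ']  -- sequence[idx]; idx < len by construction
      (List.range mut_list.length).foldl
        (fun st2 mut_idx =>
          let mut_label := mut_list.getD mut_idx ""  -- mut_list[mut_idx]; in range by construction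
          let variant_label := PySem.Str.join "" [wt_label, position_label, mut_label]  -- ''.join(label_list)
          (st2.1 ++ [position_label], st2.2.1 ++ [variant_label],
           st2.2.2.1 ++ [wt_label], st2.2.2.2 ++ [mut_label]))
        st)
    ([], [], [], [])

-- ===== PORT B =====
-- Literal transliteration of B: each column built on its own from the flat index k
-- (k // m is Nat division here, exact for Python's // on the nonnegative k, m).
def expand_sequence_alt (sequence : String) (alphabet_order : String) :
    List String × List String × List String × List String :=
  let n := sequence.toList.length                 -- len(sequence)
  let m := alphabet_order.toList.length           -- len(alphabet_order)
  let muts : List String :=                        -- list(alphabet_order) * n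
    ((List.replicate n alphabet_order.toList).flatten).map (fun c => String.ofList [c])
  let positions : List String :=                   -- [str(k // m + 1) for k in range(n*m)]
    (List.range (n * m)).map (fun k => PySem.Int.toStr (((k / m : Nat) : Int) + 1))
  let wts : List String :=                         -- [sequence[k // m] for k in range(n*m)]; index in range
    (List.range (n * m)).map (fun k => String.ofList [sequence.toList.getD (k / m) ' '])
  let labels : List String :=                      -- [w + p + u for w, p, u in zip(wts, positions, muts)]
    ((wts.zip positions).zip muts).map
      (fun wpu => String.ofList (wpu.1.1.toList ++ wpu.1.2.toList ++ wpu.2.toList))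
  (positions, labels, wts, muts)

-- ===== PRECONDITION & SPEC =====
def Spec_expand_sequence (sequence : String) (alphabet_order : String) (out : List String × List String × List String × List String) : Prop := out = expand_sequence_alt sequence alphabet_order
instance (sequence : String) (alphabet_order : String) (out : List String × List String × List String × List String) : Decidable (Spec_expand_sequence sequence alphabet_order out) := by unfold Spec_expand_sequence; infer_instance

-- ===== CLAIM =====
def Claim_equal_expand_sequence : Prop := ∀ (sequence : String) (alphabet_order : String), Dom_expand_sequence sequence alphabet_order → Spec_expand_sequence sequence alphabet_order (expand_sequence sequence alphabet_order)

-- ===== LEMMAS AND PROOFS =====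

-- index-fold over range(len xs) with xs[i] is a fold over xs itself
theorem foldl_range_getD {α β : Type} (f : β → α → β) :
    ∀ (xs : List α) (d : α) (init : β),
      (List.range xs.length).foldl (fun st i => f st (xs.getD i d)) init = xs.foldl f init := by
  intro xs
  induction xs with
  | nil => intro d init; rfl
  | cons x xs ih =>
      intro d init
      rw [List.length_cons, List.range_succ_eq_map, List.foldl_cons, List.foldl_map]
      simpa using ih d (f init x)

-- the inner loop appends one column entry per mutation
theorem inner_fold (w p : String) :
    ∀ (ml : List String) (st : List String × List String × List String × List String),
      ml.foldl
        (fun st2 mut_label =>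
          (st2.1 ++ [p], st2.2.1 ++ [PySem.Str.join "" [w, p, mut_label]],
           st2.2.2.1 ++ [w], st2.2.2.2 ++ [mut_label])) st
      = (st.1 ++ ml.map (fun _ => p),
         st.2.1 ++ ml.map (fun m => PySem.Str.join "" [w, p, m]),
         st.2.2.1 ++ ml.map (fun _ => w),
         st.2.2.2 ++ ml) := by
  intro ml
  induction ml with
  | nil => intro st; simp
  | cons m ml ih =>
      intro st
      rw [List.foldl_cons, ih]
      simp

-- ''.join([w, p, m]) on one-character w and m is list concatenation
theorem join3 (c m : Char) (p : String) :
    PySem.Str.join "" [String.ofList [c], p, String.ofList [m]] = String.ofList (c :: p.toList ++ [m]) := by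
  apply String.toList_inj.mp
  rw [PySem.Str.toList_join]
  simp [PySem.Chars.join, List.intercalate]

-- A's inner loop, named (defeq to the port's inner fold for the position's labels)
def stepA (al : List Char) (p w : String)
    (st : List String × List String × List String × List String) :
    List String × List String × List String × List String :=
  (List.range (al.map (fun c => String.ofList [c])).length).foldl
    (fun st2 mut_idx =>
      (st2.1 ++ [p],
       st2.2.1 ++ [PySem.Str.join "" [w, p, (al.map (fun c => String.ofList [c])).getD mut_idx ""]],
       st2.2.2.1 ++ [w],
       st2.2.2.2 ++ [(al.map (fun c => String.ofList [c])).getD mut_idx ""])) st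

theorem stepA_eq (al : List Char) (p w : String)
    (st : List String × List String × List String × List String) :
    stepA al p w st
    = (st.1 ++ al.map (fun _ => p),
       st.2.1 ++ al.map (fun m => PySem.Str.join "" [w, p, String.ofList [m]]),
       st.2.2.1 ++ al.map (fun _ => w),
       st.2.2.2 ++ al.map (fun m => String.ofList [m])) := by
  unfold stepA
  rw [foldl_range_getD
        (fun st2 mut_label =>
          (st2.1 ++ [p], st2.2.1 ++ [PySem.Str.join "" [w, p, mut_label]],
           st2.2.2.1 ++ [w], st2.2.2.2 ++ [mut_label]))
        (al.map (fun c => String.ofList [c])) "" st]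
  rw [inner_fold w p]
  simp [Function.comp_def]

-- the canonical record list (B's four columns are its projections)
def recs (al : List Char) : List Char → Int → List (String × String × String × String)
  | [], _ => []
  | c :: s, k =>
      (al.map (fun m =>
        (PySem.Int.toStr (k + 1),
         String.ofList (c :: (PySem.Int.toStr (k + 1)).toList ++ [m]),
         String.ofList [c], String.ofList [m]))) ++ recs al s (k + 1)

-- A's outer loop (offset k) appends exactly the four columns of recs
theorem A_fold (al : List Char) :
    ∀ (s : List Char) (k : Nat) (st : List String × List String × List String × List String),
      (List.range s.length).foldl
        (fun st idx =>
          stepA al (PySem.Int.toStr (((k + idx : Nat) : Int) + 1))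
            (String.ofList [s.getD idx ' ']) st) st
      = (st.1 ++ (recs al s (k : Int)).map (·.1),
         st.2.1 ++ (recs al s (k : Int)).map (·.2.1),
         st.2.2.1 ++ (recs al s (k : Int)).map (·.2.2.1),
         st.2.2.2 ++ (recs al s (k : Int)).map (·.2.2.2)) := by
  intro s
  induction s with
  | nil => intro k st; simp [recs]
  | cons c s ih =>
      intro k st
      have hf :
          (fun (st : List String × List String × List String × List String) (i : Nat) =>
              stepA al (PySem.Int.toStr (((k + Nat.succ i : Nat) : Int) + 1))
                (String.ofList [(c :: s).getD (Nat.succ i) ' ']) st)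
          = (fun st i =>
              stepA al (PySem.Int.toStr ((((k + 1) + i : Nat) : Int) + 1))
                (String.ofList [s.getD i ' ']) st) := by
        funext st i
        have h1 : k + Nat.succ i = (k + 1) + i := by omega
        simp [h1]
      rw [List.length_cons, List.range_succ_eq_map, List.foldl_cons, List.foldl_map]
      rw [hf, ih (k + 1), stepA_eq]
      simp [recs, join3, PySem.Int.toList_toStr, Function.comp_def, List.append_assoc]

-- splitting the flat index range of one position block
theorem range_mul_succ_map {α : Type} (m n : Nat) (g : Nat → α) :
    (List.range ((n + 1) * m)).map (fun j => g (j / m))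
    = (List.range m).map (fun _ => g 0) ++ (List.range (n * m)).map (fun j => g (j / m + 1)) := by
  have h : (n + 1) * m = m + n * m := by ring
  rw [h, List.range_add, List.map_append, List.map_map]
  congr 1
  · exact List.map_congr_left (fun j hj => by
      rw [Nat.div_eq_of_lt (List.mem_range.mp hj)])
  · exact List.map_congr_left (fun j hj => by
      have hj' := List.mem_range.mp hj
      have hm : 0 < m := by
        rcases Nat.eq_zero_or_pos m with h0 | h0
        · subst h0; simp at hj'
        · exact h0
      simp only [Function.comp]
      rw [Nat.add_comm m j, Nat.add_div_right j hm])

-- B's position column is the first projection of recs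
theorem colPos (al : List Char) :
    ∀ (s : List Char) (k : Nat),
      (List.range (s.length * al.length)).map
        (fun j => PySem.Int.toStr (((j / al.length + k : Nat) : Int) + 1))
      = (recs al s (k : Int)).map (·.1) := by
  intro s
  induction s with
  | nil => intro k; simp [recs]
  | cons c s ih =>
      intro k
      rw [List.length_cons,
          range_mul_succ_map al.length s.length
            (fun t => PySem.Int.toStr (((t + k : Nat) : Int) + 1))]
      have hsh :
          (fun j => PySem.Int.toStr (((j / al.length + 1 + k : Nat) : Int) + 1))
          = (fun j => PySem.Int.toStr (((j / al.length + (k + 1) : Nat) : Int) + 1)) := by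
        funext j; congr 1; push_cast; ring
      rw [hsh, ih (k + 1)]
      simp only [recs, List.map_append, List.map_map, Function.comp_def,
        Nat.cast_add, Nat.cast_one, Nat.zero_add]
      congr 1
      rw [List.map_const', List.map_const', List.length_range]

-- B's wild-type column is the third projection of recs
theorem colWt (al : List Char) :
    ∀ (s : List Char) (k : Int),
      (List.range (s.length * al.length)).map
        (fun j => String.ofList [s.getD (j / al.length) ' '])
      = (recs al s k).map (·.2.2.1) := by
  intro s
  induction s with
  | nil => intro k; simp [recs]
  | cons c s ih =>
      intro k
      rw [List.length_cons,
          range_mul_succ_map al.length s.length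
            (fun t => String.ofList [(c :: s).getD t ' '])]
      simp only [List.getD_cons_zero, List.getD_cons_succ]
      rw [ih (k + 1)]
      simp [recs, Function.comp_def, List.map_const']

-- B's mutant column is the fourth projection of recs
theorem colMut (al : List Char) :
    ∀ (s : List Char) (k : Int),
      ((List.replicate s.length al).flatten).map (fun c => String.ofList [c])
      = (recs al s k).map (·.2.2.2) := by
  intro s
  induction s with
  | nil => intro k; simp [recs]
  | cons c s ih =>
      intro k
      rw [List.length_cons, List.replicate_succ, List.flatten_cons, List.map_append, ih (k + 1)]
      simp [recs, Function.comp_def]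

-- zipping three maps of the same list is one map
theorem zip3_map {α β γ δ : Type} (l : List α) (a : α → β) (b : α → γ) (c : α → δ) :
    ((l.map a).zip (l.map b)).zip (l.map c) = l.map (fun r => ((a r, b r), c r)) := by
  induction l with
  | nil => rfl
  | cons x l ih => simp [ih]

-- concatenating the three recs columns elementwise rebuilds the label column
theorem colLabel (al : List Char) :
    ∀ (s : List Char) (k : Int),
      (recs al s k).map
        (fun r => String.ofList (r.2.2.1.toList ++ r.1.toList ++ r.2.2.2.toList))
      = (recs al s k).map (·.2.1) := by
  intro s
  induction s with
  | nil => intro k; simp [recs]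
  | cons c s ih =>
      intro k
      simp only [recs, List.map_append, List.map_map]
      rw [ih (k + 1)]
      congr 1
      exact List.map_congr_left (fun m _ => by
        simp [Function.comp, String.toList_ofList, PySem.Int.toList_toStr])

-- the label column in the zipped shape B's port produces
theorem colLabel' (al : List Char) (s : List Char) (k : Int) :
    ((((recs al s k).map (·.2.2.1)).zip ((recs al s k).map (·.1))).zip
        ((recs al s k).map (·.2.2.2))).map
      (fun wpu => String.ofList (wpu.1.1.toList ++ wpu.1.2.toList ++ wpu.2.toList))
    = (recs al s k).map (·.2.1) := by
  rw [zip3_map, List.map_map]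
  exact Eq.trans (List.map_congr_left (fun r _ => rfl)) (colLabel al s k)

theorem expand_sequence_eq (sequence alphabet_order : String) :
    expand_sequence sequence alphabet_order = expand_sequence_alt sequence alphabet_order := by
  have hA : expand_sequence sequence alphabet_order
      = (((recs alphabet_order.toList sequence.toList 0).map (·.1),
          (recs alphabet_order.toList sequence.toList 0).map (·.2.1),
          (recs alphabet_order.toList sequence.toList 0).map (·.2.2.1),
          (recs alphabet_order.toList sequence.toList 0).map (·.2.2.2))) := by
    have h := A_fold alphabet_order.toList sequence.toList 0 ([], [], [], [])
    simp only [Nat.zero_add, Nat.cast_zero, List.nil_append] at h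
    exact h
  rw [hA]
  show _ = expand_sequence_alt sequence alphabet_order
  unfold expand_sequence_alt
  have hpos :
      (List.range (sequence.toList.length * alphabet_order.toList.length)).map
        (fun k => PySem.Int.toStr (((k / alphabet_order.toList.length : Nat) : Int) + 1))
      = (recs alphabet_order.toList sequence.toList 0).map (·.1) := by
    have h := colPos alphabet_order.toList sequence.toList 0
    simpa using h
  have hwt := colWt alphabet_order.toList sequence.toList 0
  have hmut := colMut alphabet_order.toList sequence.toList 0
  simp only
  rw [hpos, hwt, hmut, colLabel']

-- ===== VERDICT =====
theorem expand_sequence_spec : Claim_equal_expand_sequence := by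
  intro sequence alphabet_order _
  show _ = _
  exact expand_sequence_eq sequence alphabet_order
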